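-- pv_equiv track=rewrite | github.com/NeilVibe/LocalizationTools | RessourcesForCodingTheProject/SECONDARY PYTHON SCRIPTS/keycheckinexcel.py | find_partial_matches
-- ===== SOURCE A (Python) =====
-- def find_partial_matches(excel_ids, xml_ids):
--     """Return dict of excel_id -> matching_xml_ids for partial matches."""
--     partial_matches = {}
--     for eid in excel_ids:
--         if eid in xml_ids:
--             continue  # exact match already handled
--         matches = [xid for xid in xml_ids if eid in xid]
--         if matches:
--             partial_matches[eid] = matches
--     return partial_matches
-- ===== SOURCE B (Python) =====
-- def find_partial_matches(excel_ids, xml_ids):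
--     """Return dict of excel_id -> matching_xml_ids for partial matches.
--
--     Inverted build: one pass over xml_ids fills per-candidate buckets, then
--     one pass over excel_ids emits them in the original key order."""
--     xml_set = set(xml_ids)
--     candidates = [e for e in dict.fromkeys(excel_ids) if e not in xml_set]
--     buckets = {}
--     for xid in xml_ids:
--         for eid in candidates:
--             if eid in xid:
--                 buckets.setdefault(eid, []).append(xid)
--     result = {}
--     for eid in excel_ids:
--         if eid in buckets:
--             result[eid] = buckets[eid]
--     return result
-- ===== Notes on version B (the rewrite author's own statement) =====
-- stated objective: alternative
-- what changed: B inverts the loop nest: it deduplicates excel_ids and drops exact matches up front, builds an inverted index (bucket per candidate) in a single pass over xml_ids, then emits buckets in excel_ids order, instead of A's per-eid inner scan of xml_ids with repeated work for duplicate/exact-match eids.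
import Mathlib
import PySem

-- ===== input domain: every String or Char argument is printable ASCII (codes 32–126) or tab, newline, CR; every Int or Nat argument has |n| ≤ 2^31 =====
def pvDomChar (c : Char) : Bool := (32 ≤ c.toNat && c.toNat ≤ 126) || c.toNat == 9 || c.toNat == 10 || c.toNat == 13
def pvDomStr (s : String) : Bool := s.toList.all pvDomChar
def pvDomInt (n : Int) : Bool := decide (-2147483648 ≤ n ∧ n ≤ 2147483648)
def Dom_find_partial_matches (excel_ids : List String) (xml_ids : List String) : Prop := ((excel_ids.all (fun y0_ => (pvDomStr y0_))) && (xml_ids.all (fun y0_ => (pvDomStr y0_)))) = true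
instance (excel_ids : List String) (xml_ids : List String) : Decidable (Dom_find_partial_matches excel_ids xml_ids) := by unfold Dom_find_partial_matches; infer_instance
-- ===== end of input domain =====

-- B replaces A's per-eid scan of xml_ids by an inverted-index build over the deduplicated
-- non-exact-match excel ids, emitted in excel_ids order (objective: alternative).


-- ===== PORT A =====
def find_partial_matches (excel_ids : List String) (xml_ids : List String) : List (String × List String) :=
  (excel_ids.foldl (fun partial_matches eid =>
    if xml_ids.contains eid then partial_matches   -- 'if eid in xml_ids: continue'
    else
      let matches_ := xml_ids.filter (fun xid => PySem.Str.isIn eid xid)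
      if matches_ ≠ [] then partial_matches.insert eid matches_ else partial_matches)
    PySem.Dict.empty).items

-- ===== PORT B =====
def find_partial_matches_alt (excel_ids : List String) (xml_ids : List String) : List (String × List String) :=
  let xml_set := PySem.Set.ofList xml_ids
  let candidates := (PySem.List.dedup excel_ids).filter (fun e => !(PySem.Set.contains xml_set e))
  let buckets := xml_ids.foldl (fun b xid =>
    candidates.foldl (fun b eid =>
      if PySem.Str.isIn eid xid then b.modify eid [] (fun l => l ++ [xid]) else b) b)   -- setdefault(eid, []).append(xid)
    PySem.Dict.empty
  (excel_ids.foldl (fun result eid =>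
    match buckets.get? eid with   -- 'if eid in buckets: result[eid] = buckets[eid]'
    | some v => result.insert eid v
    | none => result)
    PySem.Dict.empty).items

-- ===== PRECONDITION & SPEC =====
def Spec_find_partial_matches (excel_ids : List String) (xml_ids : List String) (out : List (String × List String)) : Prop := out = find_partial_matches_alt excel_ids xml_ids
instance (excel_ids : List String) (xml_ids : List String) (out : List (String × List String)) : Decidable (Spec_find_partial_matches excel_ids xml_ids out) := by unfold Spec_find_partial_matches; infer_instance

-- ===== CLAIM (what is proved, stated in full; the proofs are below) =====
def Claim_equal_find_partial_matches : Prop := ∀ (excel_ids : List String) (xml_ids : List String), Dom_find_partial_matches excel_ids xml_ids → Spec_find_partial_matches excel_ids xml_ids (find_partial_matches excel_ids xml_ids)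

-- ===== LEMMAS AND PROOFS =====

-- get? after modify (this exact get?-level form is not in the PySem lemma list)
theorem pv_get?_modify (d : PySem.Dict String (List String)) (k k' : String)
    (f : List String → List String) :
    (d.modify k [] f).get? k' = if k' = k then some (f (d.getD k [])) else d.get? k' := by
  simp [PySem.Dict.modify, PySem.Dict.get?_insert, PySem.Dict.getD_eq_get?_getD]

-- one inner pass over the (Nodup) candidate list: its effect on get? e
theorem pv_inner (p : String → Bool) (cands : List String) (hnd : cands.Nodup) (xid : String)
    (d : PySem.Dict String (List String)) (e : String) :
    (cands.foldl (fun b eid =>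
      if p eid then b.modify eid [] (fun l => l ++ [xid]) else b) d).get? e =
    if e ∈ cands ∧ p e then some (d.getD e [] ++ [xid]) else d.get? e := by
  induction cands generalizing d with
  | nil => simp
  | cons c cs ih =>
    simp only [List.nodup_cons] at hnd
    simp only [List.foldl_cons]
    rw [ih hnd.2]
    by_cases hec : e = c
    · subst hec
      have he : e ∉ cs := hnd.1
      by_cases hin : p e
      · simp [hin, he, pv_get?_modify, PySem.Dict.getD_eq_get?_getD]
      · simp [hin, he]
    · by_cases hin : p c
      · by_cases hecs : e ∈ cs ∧ p e
        · simp [hin, hecs, PySem.Dict.getD_eq_get?_getD, pv_get?_modify, hec, List.mem_cons]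
        · simp only [List.mem_cons] at *
          simp [hin, hecs, pv_get?_modify, hec]
      · by_cases hecs : e ∈ cs ∧ p e
        · simp [hin, hecs, List.mem_cons]
        · simp only [List.mem_cons] at *
          simp [hin, hecs]
          tauto

-- the same accumulation, viewed on one key as a fold over Option
theorem pv_optfold (r : String → Bool) (xs : List String) (o : Option (List String)) :
    xs.foldl (fun o xid => if r xid then some (o.getD [] ++ [xid]) else o) o =
    (if xs.filter r = [] then o else some (o.getD [] ++ xs.filter r)) := by
  induction xs generalizing o with
  | nil => simp
  | cons x t ih =>
    by_cases hx : r x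
    · simp only [List.foldl_cons, hx, if_pos, List.filter_cons_of_pos hx]
      rw [ih]
      by_cases ht : t.filter r = []
      · simp [ht]
      · simp [ht]
    · rw [List.foldl_cons, if_neg (by simpa using hx), List.filter_cons_of_neg (by simpa using hx), ih]

theorem pv_outer (q : String → String → Bool) (cands : List String) (hnd : cands.Nodup)
    (xs : List String) (d : PySem.Dict String (List String)) (e : String) :
    (xs.foldl (fun b xid =>
      cands.foldl (fun b eid =>
        if q eid xid then b.modify eid [] (fun l => l ++ [xid]) else b) b) d).get? e =
    xs.foldl (fun o xid => if e ∈ cands ∧ q e xid then some (o.getD [] ++ [xid]) else o)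
      (d.get? e) := by
  induction xs generalizing d with
  | nil => simp
  | cons x t ih =>
    simp only [List.foldl_cons]
    rw [ih]
    rw [pv_inner (fun eid => q eid x) cands hnd x d e]
    by_cases hc : e ∈ cands
    · simp [hc, PySem.Dict.getD_eq_get?_getD]
    · simp [hc]

-- B's bucket dict, characterized: bucket of e = xs filtered by q e, when nonempty and e is a candidate
theorem pv_buckets (q : String → String → Bool) (cands : List String) (hnd : cands.Nodup)
    (xs : List String) (e : String) :
    (xs.foldl (fun b xid =>
      cands.foldl (fun b eid =>
        if q eid xid then b.modify eid [] (fun l => l ++ [xid]) else b) b)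
      PySem.Dict.empty).get? e =
    (if e ∈ cands ∧ xs.filter (q e) ≠ [] then some (xs.filter (q e)) else none) := by
  rw [pv_outer q cands hnd xs PySem.Dict.empty e]
  by_cases hc : e ∈ cands
  · simp only [hc, true_and, PySem.Dict.get?_empty]
    rw [pv_optfold (q e) xs none]
    by_cases hf : xs.filter (q e) = []
    · simp [hf]
    · simp [hf]
  · simp only [hc, false_and, if_false, PySem.Dict.get?_empty]
    induction xs with
    | nil => simp
    | cons x t ih => simp [ih]

theorem pv_main (excel_ids xml_ids : List String) :
    find_partial_matches excel_ids xml_ids = find_partial_matches_alt excel_ids xml_ids := by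
  unfold find_partial_matches find_partial_matches_alt
  congr 1
  have hnd : ((PySem.List.dedup excel_ids).filter
      (fun e => !(PySem.Set.contains (PySem.Set.ofList xml_ids) e))).Nodup :=
    (PySem.List.nodup_dedup excel_ids).filter _
  apply PySem.List.foldl_congr_mem
  intro acc eid hmem
  dsimp only
  rw [pv_buckets _ _ hnd xml_ids eid]
  have hcand : eid ∈ (PySem.List.dedup excel_ids).filter
      (fun e => !(PySem.Set.contains (PySem.Set.ofList xml_ids) e)) ↔ eid ∉ xml_ids := by
    simp [List.mem_filter, hmem, PySem.Set.mem_ofList]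
  by_cases hx : eid ∈ xml_ids
  · simp [hx]
  · have : xml_ids.contains eid = false := by simpa using hx
    simp only [this, Bool.false_eq_true, if_false, hcand.mpr hx, true_and]
    by_cases hf : xml_ids.filter (fun xid => PySem.Str.isIn eid xid) = []
    · rw [if_neg (not_not_intro hf), if_neg (not_not_intro hf)]
    · rw [if_pos hf, if_pos hf]

-- ===== VERDICT (by name: the statement is the Claim_ definition above) =====
theorem find_partial_matches_spec : Claim_equal_find_partial_matches := by
  intro excel_ids xml_ids _
  unfold Spec_find_partial_matches
  exact pv_main excel_ids xml_ids
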